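-- pv_equiv track=rewrite | github.com/racersmith/keychain | client_code/routes.py | update_missing_from_dict
-- ===== SOURCE A (Python) =====
-- def extract_missing(data: dict, missing_value=None):
--     """Get the sub-dict that contains missing values"""
--     return {key: missing_value for key, value in data.items() if value == missing_value}
--
-- def update_missing_from_dict(data: dict, update_from: dict, missing_value):
--     """ Update the data dict without changing its keys """
--     missing = extract_missing(data)
--     if missing:
--         missing = {
--             key: update_from[key] for key in missing.keys() if key in update_from
--         }
--         data.update(missing)
--     return data
-- ===== SOURCE B (Python) =====
-- def update_missing_from_dict(data: dict, update_from: dict, missing_value):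
--     """ Update the data dict without changing its keys """
--     for key, value in data.items():
--         if value == None and key in update_from:
--             data[key] = update_from[key]
--     return data
-- ===== Notes on version B (the rewrite author's own statement) =====
-- stated objective: simpler
-- what changed: Replaces A's two intermediate dict comprehensions (extract the None-valued sub-dict, then re-filter it against update_from) and the final dict.update with one direct pass over data.items() that assigns update_from[key] in place whenever the value is None and the key exists in update_from.
import Mathlib
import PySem

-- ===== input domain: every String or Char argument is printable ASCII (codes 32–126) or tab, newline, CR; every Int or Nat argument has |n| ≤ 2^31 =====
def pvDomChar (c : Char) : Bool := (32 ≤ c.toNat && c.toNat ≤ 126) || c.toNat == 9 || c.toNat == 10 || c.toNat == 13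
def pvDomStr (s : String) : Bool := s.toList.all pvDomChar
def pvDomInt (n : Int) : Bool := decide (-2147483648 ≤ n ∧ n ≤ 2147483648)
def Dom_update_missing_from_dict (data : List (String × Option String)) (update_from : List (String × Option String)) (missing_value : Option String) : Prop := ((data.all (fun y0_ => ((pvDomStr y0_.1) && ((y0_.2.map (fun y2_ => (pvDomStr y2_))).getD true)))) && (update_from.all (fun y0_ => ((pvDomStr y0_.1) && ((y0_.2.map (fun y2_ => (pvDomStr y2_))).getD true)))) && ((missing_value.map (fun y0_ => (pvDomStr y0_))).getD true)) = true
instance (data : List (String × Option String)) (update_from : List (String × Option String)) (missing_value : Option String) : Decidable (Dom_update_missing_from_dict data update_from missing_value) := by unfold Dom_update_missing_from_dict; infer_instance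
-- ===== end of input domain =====

-- B is a single in-place pass over data.items() instead of A's two dict comprehensions plus dict.update
-- (objective: simpler). Both A and B mutate `data` in Python; the equivalence proved here is about the
-- returned dict's items (which both programs also leave `data` equal to).

-- ===== PORT A =====
-- {key: missing_value for key, value in data.items() if value == missing_value}
def extract_missing (data : PySem.Dict String (Option String)) (missing_value : Option String) : PySem.Dict String (Option String) :=
  data.items.foldl (fun d kv => if kv.2 == missing_value then d.insert kv.1 missing_value else d) PySem.Dict.empty

def update_missing_from_dict (data : List (String × Option String)) (update_from : List (String × Option String)) (missing_value : Option String) : List (String × Option String) :=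
  let dataD : PySem.Dict String (Option String) := PySem.Dict.mk data
  let updD : PySem.Dict String (Option String) := PySem.Dict.mk update_from
  let missing := extract_missing dataD none          -- extract_missing(data)  (default missing_value=None)
  if missing.items.isEmpty then dataD.items          -- `if missing:` (dict truthiness); skip the update
  else
    -- {key: update_from[key] for key in missing.keys() if key in update_from}
    -- (update_from[key] cannot raise: guarded by `key in update_from`, so getD is exact)
    let missing2 := missing.keys.foldl
      (fun d k => if updD.contains k then d.insert k (updD.getD k none) else d) PySem.Dict.empty
    -- data.update(missing2); return data
    (missing2.items.foldl (fun d kv => d.insert kv.1 kv.2) dataD).items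

-- ===== PORT B =====
def update_missing_from_dict_alt (data : List (String × Option String)) (update_from : List (String × Option String)) (missing_value : Option String) : List (String × Option String) :=
  let updD : PySem.Dict String (Option String) := PySem.Dict.mk update_from
  -- for key, value in data.items(): if value == None and key in update_from: data[key] = update_from[key]
  (data.foldl
    (fun d kv => if kv.2 == (none : Option String) && updD.contains kv.1
                 then d.insert kv.1 (updD.getD kv.1 none) else d)
    (PySem.Dict.mk data)).items

-- ===== PRECONDITION & SPEC =====
def Spec_update_missing_from_dict (data : List (String × Option String)) (update_from : List (String × Option String)) (missing_value : Option String) (out : List (String × Option String)) : Prop := out = update_missing_from_dict_alt data update_from missing_value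
instance (data : List (String × Option String)) (update_from : List (String × Option String)) (missing_value : Option String) (out : List (String × Option String)) : Decidable (Spec_update_missing_from_dict data update_from missing_value out) := by unfold Spec_update_missing_from_dict; infer_instance

-- ===== CLAIM (what is proved, stated in full; the proofs are below) =====
def Claim_equal_update_missing_from_dict : Prop := ∀ (data : List (String × Option String)) (update_from : List (String × Option String)) (missing_value : Option String), Dom_update_missing_from_dict data update_from missing_value → Spec_update_missing_from_dict data update_from missing_value (update_missing_from_dict data update_from missing_value)

-- ===== LEMMAS AND PROOFS =====

-- keys reached by the `missing` comprehension: exactly the keys that occur with value none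
theorem mem_keys_missing (l : List (String × Option String)) (d : PySem.Dict String (Option String)) (k : String) :
    k ∈ (l.foldl (fun d kv => if kv.2 == (none : Option String) then d.insert kv.1 none else d) d).keys
      ↔ k ∈ d.keys ∨ (k, (none : Option String)) ∈ l := by
  induction l generalizing d with
  | nil => simp
  | cons kv l ih =>
    simp only [List.foldl_cons]
    by_cases h : kv.2 = none
    · rw [if_pos (by simp [h]), ih, PySem.Dict.mem_keys_insert, List.mem_cons]
      have hkv : ((k, (none : Option String)) = kv) ↔ k = kv.1 := by
        cases kv with | mk a b => subst h; simp
      rw [hkv]; tauto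
    · rw [if_neg (by simp [h]), ih, List.mem_cons]
      have hkv : ((k, (none : Option String)) = kv) ↔ False := by
        cases kv with | mk a b =>
          simp only [Prod.mk.injEq, iff_false, not_and]
          exact fun _ hb => h hb.symm
      rw [hkv]; tauto

-- keys reached by the `missing2` comprehension
theorem mem_keys_missing2 (u : PySem.Dict String (Option String)) (L : List String) (d : PySem.Dict String (Option String)) (k : String) :
    k ∈ (L.foldl (fun d k' => if u.contains k' then d.insert k' (u.getD k' none) else d) d).keys
      ↔ k ∈ d.keys ∨ (k ∈ L ∧ u.contains k = true) := by
  induction L generalizing d with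
  | nil => simp
  | cons x L ih =>
    simp only [List.foldl_cons]
    by_cases h : u.contains x = true
    · simp only [h, if_true, ih, PySem.Dict.mem_keys_insert, List.mem_cons]
      constructor
      · rintro ((rfl | hk) | hl)
        · exact Or.inr ⟨Or.inl rfl, h⟩
        · exact Or.inl hk
        · exact Or.inr ⟨Or.inr hl.1, hl.2⟩
      · rintro (hk | ⟨(rfl | hL), hu⟩)
        · exact Or.inl (Or.inr hk)
        · exact Or.inl (Or.inl rfl)
        · exact Or.inr ⟨hL, hu⟩
    · simp only [h, ih, List.mem_cons]
      constructor
      · rintro (hk | hl)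
        · exact Or.inl hk
        · exact Or.inr ⟨Or.inr hl.1, hl.2⟩
      · rintro (hk | ⟨(rfl | hL), hu⟩)
        · exact Or.inl hk
        · exact absurd hu h
        · exact Or.inr ⟨hL, hu⟩

-- every value in `missing2` is the update_from lookup of its key
theorem val_missing2 (u : PySem.Dict String (Option String)) (L : List String) (d : PySem.Dict String (Option String))
    (hd : ∀ kv ∈ d.items, kv.2 = u.getD kv.1 none) :
    ∀ kv ∈ (L.foldl (fun d k' => if u.contains k' then d.insert k' (u.getD k' none) else d) d).items,
      kv.2 = u.getD kv.1 none := by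
  induction L generalizing d with
  | nil => exact hd
  | cons x L ih =>
    simp only [List.foldl_cons]
    split
    · refine ih _ ?_
      intro kv hkv
      rcases (PySem.Dict.mem_items_insert _ _ _ _).mp hkv with rfl | ⟨hmem, _⟩
      · rfl
      · exact hd kv hmem
    · exact ih _ hd

-- folding `insert` over a pair list whose values are w of their keys, into a dict that contains all those keys,
-- rewrites the items pointwise
theorem items_foldl_insert_pairs (m : List (String × Option String)) (w : String → Option String)
    (d : PySem.Dict String (Option String))
    (hc : ∀ kv ∈ m, d.contains kv.1 = true) (hw : ∀ kv ∈ m, kv.2 = w kv.1) :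
    (m.foldl (fun d kv => d.insert kv.1 kv.2) d).items
      = d.items.map (fun p => if p.1 ∈ m.map Prod.fst then (p.1, w p.1) else p) := by
  induction m generalizing d with
  | nil => simp
  | cons kv m ih =>
    simp only [List.foldl_cons]
    have hins : (d.insert kv.1 kv.2).items = d.items.map (fun p => if p.1 == kv.1 then (kv.1, kv.2) else p) :=
      PySem.Dict.items_insert_of_contains _ _ (hc kv (List.mem_cons_self))
    have hc' : ∀ x ∈ m, (d.insert kv.1 kv.2).contains x.1 = true := by
      intro x hx
      rw [PySem.Dict.contains_insert]
      simp [hc x (List.mem_cons_of_mem _ hx)]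
    rw [ih _ hc' (fun x hx => hw x (List.mem_cons_of_mem _ hx)), hins, List.map_map]
    apply List.map_congr_left
    intro p _
    by_cases hpk : p.1 = kv.1
    · simp only [Function.comp, hpk, beq_self_eq_true, if_true, List.map_cons, List.mem_cons]
      have : kv.2 = w kv.1 := hw kv List.mem_cons_self
      by_cases hmem : kv.1 ∈ m.map Prod.fst <;> simp [hmem, this]
    · have : (p.1 == kv.1) = false := by simp [hpk]
      simp only [Function.comp, this, Bool.false_eq_true, if_false, List.map_cons, List.mem_cons]
      by_cases hmem : p.1 ∈ m.map Prod.fst <;> simp [hmem, hpk]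

-- B's single pass, pointwise
theorem items_foldl_B (u : PySem.Dict String (Option String)) (l : List (String × Option String))
    (d : PySem.Dict String (Option String)) (hc : ∀ kv ∈ l, d.contains kv.1 = true) :
    (l.foldl (fun d kv => if kv.2 == (none : Option String) && u.contains kv.1
                          then d.insert kv.1 (u.getD kv.1 none) else d) d).items
      = d.items.map (fun p => if (p.1, (none : Option String)) ∈ l ∧ u.contains p.1 = true
                              then (p.1, u.getD p.1 none) else p) := by
  induction l generalizing d with
  | nil => simp
  | cons kv l ih =>
    simp only [List.foldl_cons]
    by_cases hcond : kv.2 = none ∧ u.contains kv.1 = true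
    · have hb : ((kv.2 == (none : Option String)) && u.contains kv.1) = true := by
        simp [hcond.1, hcond.2]
      rw [if_pos hb]
      have hins : (d.insert kv.1 (u.getD kv.1 none)).items
          = d.items.map (fun p => if p.1 == kv.1 then (kv.1, u.getD kv.1 none) else p) :=
        PySem.Dict.items_insert_of_contains _ _ (hc kv (List.mem_cons_self))
      have hc' : ∀ x ∈ l, (d.insert kv.1 (u.getD kv.1 none)).contains x.1 = true := by
        intro x hx
        rw [PySem.Dict.contains_insert]
        simp [hc x (List.mem_cons_of_mem _ hx)]
      rw [ih _ hc', hins, List.map_map]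
      apply List.map_congr_left
      intro p _
      by_cases hpk : p.1 = kv.1
      · simp only [Function.comp, hpk, beq_self_eq_true, if_true, List.mem_cons]
        have hkvmem : (kv.1, (none : Option String)) = kv := by
          cases kv with | mk a b => simp_all
        by_cases hmem : (kv.1, (none : Option String)) ∈ l ∧ u.contains kv.1 = true
        · simp [hmem.1, hmem.2]
        · simp [hcond.2, hkvmem]
      · have hbp : (p.1 == kv.1) = false := by simp [hpk]
        simp only [Function.comp, hbp, Bool.false_eq_true, if_false, List.mem_cons]
        have : ((p.1, (none : Option String)) = kv ∨ (p.1, (none : Option String)) ∈ l) ∧ u.contains p.1 = true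
            ↔ (p.1, (none : Option String)) ∈ l ∧ u.contains p.1 = true := by
          constructor
          · rintro ⟨he | hl, hu⟩
            · exact absurd (congrArg Prod.fst he) hpk
            · exact ⟨hl, hu⟩
          · rintro ⟨hl, hu⟩; exact ⟨Or.inr hl, hu⟩
        by_cases hmem : (p.1, (none : Option String)) ∈ l ∧ u.contains p.1 = true
        · simp [hmem.1, hmem.2]
        · rw [if_neg hmem, if_neg (fun h => hmem (this.mp h))]
    · have hb : ((kv.2 == (none : Option String)) && u.contains kv.1) = false := by
        rcases Decidable.not_and_iff_or_not.mp hcond with h | h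
        · simp [h]
        · simp [Bool.eq_false_iff.mpr h]
      rw [if_neg (by intro h; rw [hb] at h; exact Bool.false_ne_true h)]
      rw [ih _ (fun x hx => hc x (List.mem_cons_of_mem _ hx))]
      apply List.map_congr_left
      intro p _
      have : ((p.1, (none : Option String)) ∈ kv :: l ∧ u.contains p.1 = true)
          ↔ ((p.1, (none : Option String)) ∈ l ∧ u.contains p.1 = true) := by
        constructor
        · rintro ⟨hmem, hu⟩
          rcases List.mem_cons.mp hmem with he | hl
          · exfalso
            apply hcond
            constructor
            · rw [← he]
            · rw [← he]; exact hu
          · exact ⟨hl, hu⟩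
        · rintro ⟨hl, hu⟩; exact ⟨List.mem_cons_of_mem _ hl, hu⟩
      by_cases hmem : (p.1, (none : Option String)) ∈ l ∧ u.contains p.1 = true
      · simp [hmem, this.mpr hmem]
      · simp only [if_neg hmem, if_neg (fun h => hmem (this.mp h))]

-- ===== VERDICT (by name: the statement is the Claim_ definition above) =====
theorem update_missing_from_dict_spec : Claim_equal_update_missing_from_dict := by
  intro data update_from missing_value _
  show update_missing_from_dict data update_from missing_value
      = update_missing_from_dict_alt data update_from missing_value
  simp only [update_missing_from_dict, update_missing_from_dict_alt, extract_missing]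
  have hcB : ∀ kv ∈ data, (PySem.Dict.mk data).contains kv.1 = true := by
    intro kv hkv
    rw [PySem.Dict.contains_iff_mem_keys]
    simp only [PySem.Dict.keys_mk]
    exact List.mem_map.mpr ⟨kv, hkv, rfl⟩
  rw [items_foldl_B (PySem.Dict.mk update_from) data (PySem.Dict.mk data) hcB]
  have hkeysM : ∀ k : String,
      k ∈ (data.foldl (fun d kv => if kv.2 == (none : Option String) then d.insert kv.1 (none : Option String) else d)
            PySem.Dict.empty).keys ↔ (k, (none : Option String)) ∈ data := by
    intro k
    rw [mem_keys_missing]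
    simp
  by_cases hemp : (data.foldl (fun d kv => if kv.2 == (none : Option String) then d.insert kv.1 (none : Option String) else d)
      PySem.Dict.empty).items.isEmpty
  · rw [if_pos hemp]
    have hnone : ∀ k : String, (k, (none : Option String)) ∉ data := by
      intro k hk
      have hm := (hkeysM k).mpr hk
      rw [List.isEmpty_iff] at hemp
      rw [show (data.foldl (fun d kv => if kv.2 == (none : Option String) then d.insert kv.1 (none : Option String) else d)
            PySem.Dict.empty).keys = [] from by rw [PySem.Dict.keys, hemp]; rfl] at hm
      simp at hm
    show data = List.map _ data
    conv_lhs => rw [← List.map_id data]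
    apply List.map_congr_left
    intro p _
    exact (if_neg (fun h => hnone p.1 h.1)).symm
  · rw [if_neg hemp]
    have hw : ∀ kv ∈ ((data.foldl (fun d kv => if kv.2 == (none : Option String) then d.insert kv.1 (none : Option String) else d)
          PySem.Dict.empty).keys.foldl
          (fun d k => if (PySem.Dict.mk update_from).contains k
                      then d.insert k ((PySem.Dict.mk update_from).getD k none) else d)
          PySem.Dict.empty).items,
        kv.2 = (PySem.Dict.mk update_from).getD kv.1 none := by
      apply val_missing2
      intro kv hkv
      simp [PySem.Dict.empty] at hkv
    have hkeys2 : ∀ k : String,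
        k ∈ ((data.foldl (fun d kv => if kv.2 == (none : Option String) then d.insert kv.1 (none : Option String) else d)
          PySem.Dict.empty).keys.foldl
          (fun d k => if (PySem.Dict.mk update_from).contains k
                      then d.insert k ((PySem.Dict.mk update_from).getD k none) else d)
          PySem.Dict.empty).keys
          ↔ (k, (none : Option String)) ∈ data ∧ (PySem.Dict.mk update_from).contains k = true := by
      intro k
      rw [mem_keys_missing2, hkeysM k]
      simp [PySem.Dict.keys_empty]
    have hc2 : ∀ kv ∈ ((data.foldl (fun d kv => if kv.2 == (none : Option String) then d.insert kv.1 (none : Option String) else d)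
          PySem.Dict.empty).keys.foldl
          (fun d k => if (PySem.Dict.mk update_from).contains k
                      then d.insert k ((PySem.Dict.mk update_from).getD k none) else d)
          PySem.Dict.empty).items,
        (PySem.Dict.mk data).contains kv.1 = true := by
      intro kv hkv
      have hk := PySem.Dict.mem_keys_of_mem_items _ hkv
      have hd := ((hkeys2 kv.1).mp hk).1
      rw [PySem.Dict.contains_iff_mem_keys]
      simp only [PySem.Dict.keys_mk]
      exact List.mem_map.mpr ⟨(kv.1, none), hd, rfl⟩
    rw [items_foldl_insert_pairs _ (fun k => (PySem.Dict.mk update_from).getD k none) _ hc2 hw]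
    show List.map _ data = List.map _ data
    apply List.map_congr_left
    intro p _
    have hiff : p.1 ∈ List.map Prod.fst ((data.foldl (fun d kv => if kv.2 == (none : Option String) then d.insert kv.1 (none : Option String) else d)
          PySem.Dict.empty).keys.foldl
          (fun d k => if (PySem.Dict.mk update_from).contains k
                      then d.insert k ((PySem.Dict.mk update_from).getD k none) else d)
          PySem.Dict.empty).items
        ↔ (p.1, (none : Option String)) ∈ data ∧ (PySem.Dict.mk update_from).contains p.1 = true := by
      rw [show List.map Prod.fst ((data.foldl (fun d kv => if kv.2 == (none : Option String) then d.insert kv.1 (none : Option String) else d)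
            PySem.Dict.empty).keys.foldl
            (fun d k => if (PySem.Dict.mk update_from).contains k
                        then d.insert k ((PySem.Dict.mk update_from).getD k none) else d)
            PySem.Dict.empty).items
          = ((data.foldl (fun d kv => if kv.2 == (none : Option String) then d.insert kv.1 (none : Option String) else d)
            PySem.Dict.empty).keys.foldl
            (fun d k => if (PySem.Dict.mk update_from).contains k
                        then d.insert k ((PySem.Dict.mk update_from).getD k none) else d)
            PySem.Dict.empty).keys from rfl]
      exact hkeys2 p.1
    by_cases hp : (p.1, (none : Option String)) ∈ data ∧ (PySem.Dict.mk update_from).contains p.1 = true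
    · rw [if_pos (hiff.mpr hp), if_pos hp]
    · rw [if_neg (fun h => hp (hiff.mp h)), if_neg hp]
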